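-- pv_equiv track=rewrite | github.com/nstephenh/NCSSM-CS402-PS2.py | ps2.py | fibToMe
-- ===== SOURCE A (Python) =====
-- def fibToMe(l):
-- 	"""precondition: l is an integer
-- postcondition: return the number in the fibonacci series which is the first
-- with l or more digits.
-- fibonacci number: 0 1 1 2 3 5 8 13 21 34 55 89 144
-- number in series: 0 1 2 3 4 5 6 7  8  9  10 11 12
-- fibToMe(2) -> 7
-- fibToMe(3) -> 12
-- """
-- 	fibsum = 1
-- 	fibsumprev = 0
-- 	pos = 1
-- 	while (len(str(fibsum)) <= l-1):
-- 		temp = fibsum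
-- 		fibsum = fibsum + fibsumprev
-- 		fibsumprev = temp
-- 		pos +=1
-- 	return pos
-- ===== SOURCE B (Python) =====
-- def fibToMe(l):
--     """Same result as A: index of the first Fibonacci number with l (or more) digits.
--     Instead of stepping through every Fibonacci number and str()-ing it, compute the
--     decimal digit threshold once, then locate the first position whose Fibonacci
--     number reaches it by exponential + binary search, with fast-doubling Fibonacci."""
--     t = 10 ** (l - 1) if l >= 2 else 1
--
--     def fib_pair(n):
--         # (fib(n), fib(n+1)) by fast doubling
--         if n == 0:
--             return (0, 1)
--         a, b = fib_pair(n // 2)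
--         c = a * (2 * b - a)
--         d = a * a + b * b
--         if n % 2 == 0:
--             return (c, d)
--         else:
--             return (d, c + d)
--
--     hi = 1
--     while fib_pair(hi)[0] < t:
--         hi *= 2
--     lo = hi // 2
--     while hi - lo > 1:
--         mid = (lo + hi) // 2
--         if fib_pair(mid)[0] < t:
--             lo = mid
--         else:
--             hi = mid
--     return hi
-- ===== Notes on version B (the rewrite author's own statement) =====
-- stated objective: faster
-- what changed: Replaces A's one-step-at-a-time Fibonacci loop with a per-step str() digit count by computing the decimal threshold once and locating the first position whose Fibonacci number reaches it by exponential plus binary search over positions, each probe evaluated with fast-doubling Fibonacci.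
import Mathlib
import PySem

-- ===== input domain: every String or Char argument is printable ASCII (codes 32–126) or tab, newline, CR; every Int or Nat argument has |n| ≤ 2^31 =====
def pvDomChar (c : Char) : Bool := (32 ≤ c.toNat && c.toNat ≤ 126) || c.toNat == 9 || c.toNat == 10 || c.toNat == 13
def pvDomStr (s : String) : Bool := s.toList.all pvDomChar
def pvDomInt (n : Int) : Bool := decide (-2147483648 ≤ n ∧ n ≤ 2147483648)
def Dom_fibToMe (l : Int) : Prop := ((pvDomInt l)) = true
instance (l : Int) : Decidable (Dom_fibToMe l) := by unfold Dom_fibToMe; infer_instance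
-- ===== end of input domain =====

-- B replaces A's step-by-step Fibonacci loop (with a str() digit count per step) by a
-- threshold 10^(l-1) computed once plus exponential/binary search over positions with
-- fast-doubling Fibonacci; a timing run measures B faster.

-- ===== PORT A =====
-- A's while loop; fibsum/fibsumprev start at 1/0 and stay Nat. The fuel argument is a
-- totality guard only: Lemma pvLoopA_spec shows the loop exits before it runs out.
def fibToMe.loop (fuel : Nat) (l : Int) (fibsum fibsumprev : Nat) (pos : Int) : Int :=
  match fuel with
  | 0 => pos
  | fuel + 1 =>
    if PySem.Str.len (PySem.Int.toStr (fibsum : Int)) ≤ l - 1 then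
      fibToMe.loop fuel l (fibsum + fibsumprev) fibsum (pos + 1)
    else pos

def fibToMe (l : Int) : Int :=
  fibToMe.loop (10 ^ (l - 1).toNat + 2) l 1 0 1

-- ===== PORT B =====
-- Source B's fib_pair: (fib(n), fib(n+1)) by fast doubling; fuel n covers the n ↦ n/2 descent
def fibToMe_alt.fibPairF (fuel n : Nat) : Nat × Nat :=
  match fuel, n with
  | _, 0 => (0, 1)
  | 0, _ => (0, 1)
  | fuel + 1, n =>
    let p := fibToMe_alt.fibPairF fuel (n / 2)
    let c := p.1 * (2 * p.2 - p.1)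
    let d := p.1 * p.1 + p.2 * p.2
    if n % 2 = 0 then (c, d) else (d, c + d)

def fibToMe_alt.fibPair (n : Nat) : Nat × Nat := fibToMe_alt.fibPairF n n

-- Source B's exponential search: first power-of-two position with fib >= t
def fibToMe_alt.expLoop (fuel : Nat) (t hi : Nat) : Nat :=
  match fuel with
  | 0 => hi
  | fuel + 1 =>
    if (fibToMe_alt.fibPair hi).1 < t then fibToMe_alt.expLoop fuel t (hi * 2) else hi

-- Source B's binary search on (lo, hi]
def fibToMe_alt.bsLoop (fuel : Nat) (t lo hi : Nat) : Nat :=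
  match fuel with
  | 0 => hi
  | fuel + 1 =>
    if 1 < hi - lo then
      let mid := (lo + hi) / 2
      if (fibToMe_alt.fibPair mid).1 < t then fibToMe_alt.bsLoop fuel t mid hi
      else fibToMe_alt.bsLoop fuel t lo mid
    else hi

def fibToMe_alt (l : Int) : Int :=
  let t : Nat := if 2 ≤ l then 10 ^ (l - 1).toNat else 1
  let hi := fibToMe_alt.expLoop (t + 2) t 1
  let lo := hi / 2
  (fibToMe_alt.bsLoop (hi - lo) t lo hi : Int)

-- ===== PRECONDITION & SPEC =====
def Spec_fibToMe (l : Int) (out : Int) : Prop := out = fibToMe_alt l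
instance (l : Int) (out : Int) : Decidable (Spec_fibToMe l out) := by unfold Spec_fibToMe; infer_instance

-- ===== CLAIM (what is proved, stated in full; the proofs are below) =====
def Claim_equal_fibToMe : Prop := ∀ (l : Int), Dom_fibToMe l → Spec_fibToMe l (fibToMe l)

-- ===== LEMMAS AND PROOFS =====

-- `Nat.toDigits` (the characters of `str(n)`) has exactly as many characters as `Nat.digits`.
lemma pvToDigitsCore_length (f : Nat) : ∀ (n : Nat) (l : List Char), 0 < n → n < 10 ^ f →
    (Nat.toDigitsCore 10 f n l).length = (Nat.digits 10 n).length + l.length := by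
  induction f with
  | zero => intro n l hn hlt; rw [pow_zero] at hlt; omega
  | succ f ih =>
    intro n l hn hlt
    rw [Nat.toDigitsCore]
    by_cases hx : n / 10 = 0
    · have hd : Nat.digits 10 n = n % 10 :: Nat.digits 10 (n / 10) :=
        Nat.digits_def' (by norm_num) hn
      simp [hx, hd, Nat.add_comm]
    · have hdiv : 0 < n / 10 := Nat.pos_of_ne_zero hx
      have hlt' : n / 10 < 10 ^ f := by
        apply Nat.div_lt_of_lt_mul; rw [← pow_succ']; exact hlt
      simp only [hx, if_false]
      rw [ih (n / 10) _ hdiv hlt', Nat.digits_def' (b := 10) (by norm_num) hn]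
      simp; omega

lemma pvStrLen_eq (m : Nat) (hm : 0 < m) :
    PySem.Str.len (PySem.Int.toStr (m : Int)) = ((Nat.digits 10 m).length : Int) := by
  rw [PySem.Str.len_eq, PySem.Int.toList_toStr]
  have h1 : PySem.Int.toChars (m : Int) = Nat.toDigits 10 m := by
    simp [PySem.Int.toChars]
  have hlt : m < 10 ^ (m + 1) :=
    lt_of_lt_of_le (Nat.lt_pow_self (by norm_num)) (Nat.pow_le_pow_right (by norm_num) (by omega))
  rw [h1, Nat.toDigits, pvToDigitsCore_length (m + 1) m [] hm hlt]
  simp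

-- `len(str(m)) <= j`  ⟺  `m < 10**max(j,0)`  (for m ≥ 1)
lemma pvStrLen_le_iff (m : Nat) (hm : 0 < m) (j : Int) :
    (PySem.Str.len (PySem.Int.toStr (m : Int)) ≤ j) ↔ m < 10 ^ j.toNat := by
  rw [pvStrLen_eq m hm]
  have hlen : 1 ≤ (Nat.digits 10 m).length := by
    have : Nat.digits 10 m ≠ [] := Nat.digits_ne_nil_iff_ne_zero.mpr (by omega)
    cases h : Nat.digits 10 m with
    | nil => exact absurd h this
    | cons a t => simp
  constructor
  · intro h
    have h2 : (Nat.digits 10 m).length ≤ j.toNat := by omega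
    exact (Nat.digits_length_le_iff (by norm_num) m).mp h2
  · intro h
    have h2 : (Nat.digits 10 m).length ≤ j.toNat :=
      (Nat.digits_length_le_iff (by norm_num) m).mpr h
    omega

lemma pvLe_fib : ∀ n : Nat, n ≤ Nat.fib (n + 2) := by
  intro n
  induction n with
  | zero => simp
  | succ k ih =>
    have h1 : 0 < Nat.fib (k + 1) := Nat.fib_pos.mpr (by omega)
    have h2 : Nat.fib (k + 1 + 2) = Nat.fib (k + 1) + Nat.fib (k + 1 + 1) := Nat.fib_add_two
    have h3 : k + 1 + 1 = k + 2 := rfl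
    rw [h3] at h2
    omega

lemma pvFib_lb (n : Nat) : n ≤ Nat.fib n + 2 := by
  match n with
  | 0 => omega
  | 1 => omega
  | (k + 2) => have := pvLe_fib k; omega

lemma pvFibPairF_eq : ∀ (f n : Nat), n ≤ f → fibToMe_alt.fibPairF f n = (Nat.fib n, Nat.fib (n + 1)) := by
  intro f
  induction f with
  | zero => intro n hn; interval_cases n; rfl
  | succ f ih =>
    intro n hn
    match n with
    | 0 => rfl
    | n + 1 =>
      rw [fibToMe_alt.fibPairF]
      case x => omega
      rw [ih ((n + 1) / 2) (by omega)]
      have hfib1 : Nat.fib (2 * ((n + 1) / 2)) =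
          Nat.fib ((n + 1) / 2) * (2 * Nat.fib ((n + 1) / 2 + 1) - Nat.fib ((n + 1) / 2)) :=
        Nat.fib_two_mul _
      have hfib2 : Nat.fib (2 * ((n + 1) / 2) + 1) =
          Nat.fib ((n + 1) / 2 + 1) ^ 2 + Nat.fib ((n + 1) / 2) ^ 2 := Nat.fib_two_mul_add_one _
      have hfib3 : Nat.fib (2 * ((n + 1) / 2) + 2) =
          Nat.fib (2 * ((n + 1) / 2)) + Nat.fib (2 * ((n + 1) / 2) + 1) := Nat.fib_add_two
      rcases Nat.mod_two_eq_zero_or_one (n + 1) with h2 | h2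
      · have hn1 : 2 * ((n + 1) / 2) = n + 1 := by omega
        have hn2 : 2 * ((n + 1) / 2) + 1 = n + 1 + 1 := by omega
        rw [hn1] at hfib1; rw [hn2] at hfib2
        rw [if_pos h2]
        dsimp only
        rw [Prod.mk.injEq]
        refine ⟨by rw [hfib1], by rw [hfib2, pow_two, pow_two]; ring⟩
      · have hn1 : 2 * ((n + 1) / 2) + 1 = n + 1 := by omega
        have hn2 : 2 * ((n + 1) / 2) + 2 = n + 1 + 1 := by omega
        rw [hn1] at hfib2; rw [hn2] at hfib3
        rw [if_neg (by omega : ¬ (n + 1) % 2 = 0)]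
        dsimp only
        rw [Prod.mk.injEq]
        refine ⟨by rw [hfib2, pow_two, pow_two]; ring, ?_⟩
        rw [hfib3, hfib1, hn1, hfib2, pow_two, pow_two]; ring

lemma pvFibPair_eq (n : Nat) : fibToMe_alt.fibPair n = (Nat.fib n, Nat.fib (n + 1)) :=
  pvFibPairF_eq n n le_rfl

-- Both programs return the unique n+1 with fib n < t ≤ fib (n+1), t = 10^max(l-1,0).

lemma pvUniq (t m n : Nat) (h1 : Nat.fib m < t) (h2 : t ≤ Nat.fib (m + 1))
    (h3 : Nat.fib n < t) (h4 : t ≤ Nat.fib (n + 1)) : m = n := by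
  rcases lt_trichotomy m n with h | h | h
  · have := Nat.fib_mono (show m + 1 ≤ n by omega); omega
  · exact h
  · have := Nat.fib_mono (show n + 1 ≤ m by omega); omega

lemma pvLoopA_spec (l : Int) (c : Nat) (hc : c = 10 ^ (l - 1).toNat) :
    ∀ (d k : Nat) (s p : Nat) (pos : Int),
      s = Nat.fib (k + 1) → p = Nat.fib k → pos = (k : Int) + 1 →
      c + 1 - k ≤ d → Nat.fib k < c →
      ∃ n : Nat, fibToMe.loop d l s p pos = (n : Int) + 1 ∧
        Nat.fib n < c ∧ c ≤ Nat.fib (n + 1) := by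
  intro d
  induction d with
  | zero =>
    intro k s p pos hs hp hpos hd hk
    refine ⟨k, hpos, hk, ?_⟩
    have := pvFib_lb (k + 1); omega
  | succ d ih =>
    intro k s p pos hs hp hpos hd hk
    have h1 : 0 < s := by rw [hs]; exact Nat.fib_pos.mpr (by omega)
    rw [fibToMe.loop]
    by_cases hcond : PySem.Str.len (PySem.Int.toStr (s : Int)) ≤ l - 1
    · have hflt : Nat.fib (k + 1) < c := by
        rw [pvStrLen_le_iff s h1 (l - 1)] at hcond; omega
      have hkb : k + 1 ≤ c + 1 := by have := pvFib_lb (k + 1); omega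
      rw [if_pos hcond]
      exact ih (k + 1) (s + p) s (pos + 1)
        (by rw [hs, hp, Nat.fib_add_two]; omega) hs (by rw [hpos]; push_cast; ring)
        (by omega) hflt
    · rw [if_neg hcond]
      have hge : c ≤ Nat.fib (k + 1) := by
        rw [pvStrLen_le_iff s h1 (l - 1)] at hcond; omega
      exact ⟨k, hpos, hk, hge⟩

lemma pvBs_spec (t : Nat) : ∀ (d lo hi : Nat), hi - lo ≤ d → lo < hi →
    Nat.fib lo < t → t ≤ Nat.fib hi →
    ∃ n : Nat, fibToMe_alt.bsLoop d t lo hi = n + 1 ∧ Nat.fib n < t ∧ t ≤ Nat.fib (n + 1) := by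
  intro d
  induction d with
  | zero => intro lo hi h _ _ _; omega
  | succ d ih =>
    intro lo hi hd hlt hlo hhi
    rw [fibToMe_alt.bsLoop]
    by_cases h : 1 < hi - lo
    · rw [if_pos h]
      simp only [pvFibPair_eq]
      have hmid : lo < (lo + hi) / 2 ∧ (lo + hi) / 2 < hi := by omega
      by_cases hm : Nat.fib ((lo + hi) / 2) < t
      · rw [if_pos hm]
        exact ih ((lo + hi) / 2) hi (by omega) (by omega) hm hhi
      · rw [if_neg hm]
        exact ih lo ((lo + hi) / 2) (by omega) (by omega) hlo (by omega)
    · rw [if_neg h]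
      have : hi = lo + 1 := by omega
      exact ⟨lo, this, hlo, by rw [← this]; exact hhi⟩

lemma pvExp_spec (t : Nat) : ∀ (d hi : Nat), 0 < hi → t + 2 - hi ≤ d →
    ∃ r : Nat, fibToMe_alt.expLoop d t hi = r ∧ 0 < r ∧ t ≤ Nat.fib r ∧
      (r = hi ∨ Nat.fib (r / 2) < t) := by
  intro d
  induction d with
  | zero =>
    intro hi h1 hd
    refine ⟨hi, rfl, h1, ?_, Or.inl rfl⟩
    have := pvFib_lb hi; omega
  | succ d ih =>
    intro hi h1 hd
    rw [fibToMe_alt.expLoop]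
    simp only [pvFibPair_eq]
    by_cases h : Nat.fib hi < t
    · rw [if_pos h]
      have hb := pvFib_lb hi
      obtain ⟨r, hr, hr0, hrt, hror⟩ := ih (hi * 2) (by omega) (by omega)
      refine ⟨r, hr, hr0, hrt, Or.inr ?_⟩
      rcases hror with h' | h'
      · rw [h']; simpa using h
      · exact h'
    · rw [if_neg h]
      exact ⟨hi, rfl, h1, by omega, Or.inl rfl⟩

lemma pvAlt_spec (l : Int) (c : Nat) (hc : c = 10 ^ (l - 1).toNat) :
    ∃ n : Nat, fibToMe_alt l = (n : Int) + 1 ∧ Nat.fib n < c ∧ c ≤ Nat.fib (n + 1) := by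
  have ht : (if 2 ≤ l then 10 ^ (l - 1).toNat else (1 : Nat)) = c := by
    rw [hc]; split
    · rfl
    · rw [show (l - 1).toNat = 0 by omega, pow_zero]
  have hc0 : 0 < c := by rw [hc]; positivity
  have hbody : fibToMe_alt l =
      ((fibToMe_alt.bsLoop
        ((fibToMe_alt.expLoop ((if 2 ≤ l then 10 ^ (l - 1).toNat else (1 : Nat)) + 2)
            (if 2 ≤ l then 10 ^ (l - 1).toNat else (1 : Nat)) 1) -
          (fibToMe_alt.expLoop ((if 2 ≤ l then 10 ^ (l - 1).toNat else (1 : Nat)) + 2)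
            (if 2 ≤ l then 10 ^ (l - 1).toNat else (1 : Nat)) 1) / 2)
        (if 2 ≤ l then 10 ^ (l - 1).toNat else (1 : Nat))
        ((fibToMe_alt.expLoop ((if 2 ≤ l then 10 ^ (l - 1).toNat else (1 : Nat)) + 2)
            (if 2 ≤ l then 10 ^ (l - 1).toNat else (1 : Nat)) 1) / 2)
        (fibToMe_alt.expLoop ((if 2 ≤ l then 10 ^ (l - 1).toNat else (1 : Nat)) + 2)
            (if 2 ≤ l then 10 ^ (l - 1).toNat else (1 : Nat)) 1) : Nat) : Int) := rfl
  rw [ht] at hbody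
  obtain ⟨r, hr, hr0, hrt, hror⟩ := pvExp_spec c (c + 2) 1 (by omega) (by omega)
  rw [hr] at hbody
  have hlo : Nat.fib (r / 2) < c ∧ r / 2 < r := by
    rcases hror with h' | h'
    · constructor
      · rw [h']; simpa using hc0
      · omega
    · exact ⟨h', by omega⟩
  obtain ⟨n, hn, hn1, hn2⟩ := pvBs_spec c (r - r / 2) (r / 2) r (by omega) hlo.2 hlo.1 hrt
  refine ⟨n, ?_, hn1, hn2⟩
  rw [hbody, hn]
  push_cast; ring

-- ===== VERDICT (by name: the statement is the Claim_ definition above) =====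
theorem fibToMe_spec : Claim_equal_fibToMe := by
  intro l _
  unfold Spec_fibToMe
  have hc0 : 0 < 10 ^ (l - 1).toNat := by positivity
  obtain ⟨m, hm, hm1, hm2⟩ :=
    pvLoopA_spec l (10 ^ (l - 1).toNat) rfl (10 ^ (l - 1).toNat + 2) 0 1 0 1
      (by decide) (by decide) (by norm_num) (by omega)
      (by simp only [Nat.fib_zero]; exact hc0)
  obtain ⟨n, hn, hn1, hn2⟩ := pvAlt_spec l (10 ^ (l - 1).toNat) rfl
  have hmn : m = n := pvUniq _ m n hm1 hm2 hn1 hn2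
  unfold fibToMe
  rw [hm, hn, hmn]
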